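-- pv_equiv track=rewrite | github.com/Tomotz/Wc3Utils | PdbPorter/quick_match.py | precompute_fixed_runs
-- ===== SOURCE A (Python) =====
-- def precompute_fixed_runs(pattern, mask):
--     """Return list of (offset, fixed_bytes) for contiguous non-wildcard regions."""
--     runs = []
--     i = 0
--     while i < len(mask):
--         if mask[i]:
--             start = i
--             while i < len(mask) and mask[i]:
--                 i += 1
--             runs.append((start, pattern[start:i]))
--         else:
--             i += 1
--     return runs
-- ===== SOURCE B (Python) =====
-- def precompute_fixed_runs(pattern, mask):
--     """Return list of (offset, fixed_bytes) for contiguous non-wildcard regions.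
--
--     Boundary-detection formulation: a run START is a fixed position whose left
--     neighbor is wildcard (or absent); a run END is a fixed position whose right
--     neighbor is wildcard (or absent). Starts and ends are collected by two
--     independent neighbor-comparison filters and paired up by zip; no scanning
--     state is carried.
--     """
--     n = len(mask)
--     starts = [i for i in range(n) if mask[i] and (i == 0 or not mask[i - 1])]
--     ends = [i + 1 for i in range(n) if mask[i] and (i == n - 1 or not mask[i + 1])]
--     return [(s, pattern[s:e]) for s, e in zip(starts, ends)]
-- ===== Notes on version B (the rewrite author's own statement) =====
-- stated objective: alternative
-- what changed: Replaced A's stateful nested-while scan by boundary detection: two independent neighbor-comparison filters compute the list of run starts (fixed bit with wildcard/absent left neighbor) and run ends (fixed bit with wildcard/absent right neighbor), which are then zipped and sliced; no scanning state is carried.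
import Mathlib
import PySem

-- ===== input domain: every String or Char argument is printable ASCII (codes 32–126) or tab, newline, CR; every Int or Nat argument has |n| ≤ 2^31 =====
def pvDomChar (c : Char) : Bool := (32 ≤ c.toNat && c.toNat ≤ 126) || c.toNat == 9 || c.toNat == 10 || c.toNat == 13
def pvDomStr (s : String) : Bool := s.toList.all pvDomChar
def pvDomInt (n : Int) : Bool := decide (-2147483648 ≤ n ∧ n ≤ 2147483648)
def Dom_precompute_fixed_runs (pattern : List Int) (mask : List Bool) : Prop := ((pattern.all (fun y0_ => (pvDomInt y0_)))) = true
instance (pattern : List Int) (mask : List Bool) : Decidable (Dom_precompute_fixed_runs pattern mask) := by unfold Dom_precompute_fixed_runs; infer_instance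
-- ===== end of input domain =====

-- B replaces A's stateful nested-while scan by neighbor-comparison boundary detection (starts/ends filters zipped); alternative decomposition, same cost.


-- ===== PORT A =====
-- inner while: 'while i < len(mask) and mask[i]: i += 1' — returns the final i
def pfrInner (mask : List Bool) (i : Nat) : Nat :=
  if h : i < mask.length ∧ mask.getD i false = true then pfrInner mask (i + 1) else i
termination_by mask.length - i
decreasing_by omega

-- the inner while never moves the index backwards (used by the outer loop's termination)
theorem pfrInner_ge (mask : List Bool) : ∀ n i, mask.length - i ≤ n → i ≤ pfrInner mask i := by
  intro n
  induction n with
  | zero =>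
    intro i h
    rw [pfrInner, dif_neg (fun hc => absurd hc.1 (by omega))]
  | succ m ih =>
    intro i h
    rw [pfrInner]
    split
    · rename_i hg
      have := ih (i + 1) (by omega)
      omega
    · exact le_refl _

-- the inner while strictly advances when its guard holds (termination of the outer loop)
theorem pfrInner_gt (mask : List Bool) (i : Nat)
    (h : i < mask.length ∧ mask.getD i false = true) : i < pfrInner mask i := by
  rw [pfrInner, dif_pos h]
  have := pfrInner_ge mask mask.length (i + 1) (by omega)
  omega

-- outer while loop of A, carrying the accumulated runs
def pfrOuter (pattern : List Int) (mask : List Bool) (i : Nat)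
    (runs : List (Int × List Int)) : List (Int × List Int) :=
  if hlt : i < mask.length then
    if hm : mask.getD i false = true then
      let j := pfrInner mask i
      pfrOuter pattern mask j
        (runs ++ [((i : Int), PySem.List.slice pattern (some (i : Int)) (some (j : Int)))])
    else
      pfrOuter pattern mask (i + 1) runs
  else runs
termination_by mask.length - i
decreasing_by
  · have := pfrInner_gt mask i ⟨hlt, hm⟩; omega
  · omega

def precompute_fixed_runs (pattern : List Int) (mask : List Bool) : List (Int × List Int) :=
  pfrOuter pattern mask 0 []

-- ===== PORT B =====
-- 'mask[i] and (i == 0 or not mask[i-1])' — i is the start of a run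
def pfrStartP (mask : List Bool) (i : Nat) : Bool :=
  mask.getD i false && (decide (i = 0) || !(mask.getD (i - 1) false))

-- 'mask[i] and (i == n-1 or not mask[i+1])' — i is the last index of a run
def pfrEndP (mask : List Bool) (i : Nat) : Bool :=
  mask.getD i false && (decide (i = mask.length - 1) || !(mask.getD (i + 1) false))

def precompute_fixed_runs_alt (pattern : List Int) (mask : List Bool) : List (Int × List Int) :=
  let n := mask.length
  let starts := (List.range n).filter (pfrStartP mask)
  let ends : List Nat := ((List.range n).filter (pfrEndP mask)).map (· + 1)
  (starts.zip ends).map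
    (fun p => ((p.1 : Int), PySem.List.slice pattern (some (p.1 : Int)) (some (p.2 : Int))))

-- ===== PRECONDITION & SPEC =====
def Spec_precompute_fixed_runs (pattern : List Int) (mask : List Bool) (out : List (Int × List Int)) : Prop := out = precompute_fixed_runs_alt pattern mask
instance (pattern : List Int) (mask : List Bool) (out : List (Int × List Int)) : Decidable (Spec_precompute_fixed_runs pattern mask out) := by unfold Spec_precompute_fixed_runs; infer_instance

-- ===== CLAIM (what is proved, stated in full; the proofs are below) =====
def Claim_equal_precompute_fixed_runs : Prop := ∀ (pattern : List Int) (mask : List Bool), Dom_precompute_fixed_runs pattern mask → Spec_precompute_fixed_runs pattern mask (precompute_fixed_runs pattern mask)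

-- ===== LEMMAS AND PROOFS =====

-- pfrInner stays within the list
theorem pfrInner_le (mask : List Bool) : ∀ n i, mask.length - i ≤ n → i ≤ mask.length →
    pfrInner mask i ≤ mask.length := by
  intro n
  induction n with
  | zero =>
    intro i h hle
    rw [pfrInner, dif_neg (fun hc => absurd hc.1 (by omega))]
    exact hle
  | succ m ih =>
    intro i h hle
    rw [pfrInner]
    split
    · rename_i hg
      exact ih (i + 1) (by omega) (by omega)
    · exact hle

-- every index strictly below pfrInner's result (and ≥ its start) carries a true mask bit
theorem pfrInner_all (mask : List Bool) : ∀ n i, mask.length - i ≤ n →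
    ∀ k, i ≤ k → k < pfrInner mask i → mask.getD k false = true := by
  intro n
  induction n with
  | zero =>
    intro i h k hik hk
    rw [pfrInner, dif_neg (fun hc => absurd hc.1 (by omega))] at hk
    omega
  | succ m ih =>
    intro i h k hik hk
    rw [pfrInner] at hk
    split at hk
    · rename_i hg
      rcases Nat.eq_or_lt_of_le hik with heq | hlt
      · exact heq ▸ hg.2
      · exact ih (i + 1) (by omega) k hlt hk
    · omega

-- pfrInner stops at a false bit or the end of the list
theorem pfrInner_stop (mask : List Bool) : ∀ n i, mask.length - i ≤ n →
    mask.getD (pfrInner mask i) false = false := by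
  intro n
  induction n with
  | zero =>
    intro i h
    rw [pfrInner, dif_neg (fun hc => absurd hc.1 (by omega))]
    rw [List.getD_eq_getElem?_getD, List.getElem?_eq_none (by omega)]
    rfl
  | succ m ih =>
    intro i h
    rw [pfrInner]
    split
    · rename_i hg
      exact ih (i + 1) (by omega)
    · rename_i hg
      by_cases hlt : i < mask.length
      · have : ¬ mask.getD i false = true := fun hm => hg ⟨hlt, hm⟩
        simpa using this
      · rw [List.getD_eq_getElem?_getD, List.getElem?_eq_none (by omega)]
        rfl

-- main invariant: from any index i that is not strictly inside a run, A's outer loop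
-- produces exactly B's zip of boundary filters over the remaining index range
theorem pfr_main (pattern : List Int) (mask : List Bool) :
    ∀ n i runs, mask.length - i ≤ n → i ≤ mask.length →
    (mask.getD i false = true → i = 0 ∨ mask.getD (i - 1) false = false) →
    pfrOuter pattern mask i runs =
      runs ++ ((((List.range' i (mask.length - i)).filter (pfrStartP mask)).zip
        (((List.range' i (mask.length - i)).filter (pfrEndP mask)).map (fun k : Nat => (k + 1 : Nat)))).map
        (fun p => ((p.1 : Int), PySem.List.slice pattern (some (p.1 : Int)) (some (p.2 : Int))))) := by
  intro n
  induction n with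
  | zero =>
    intro i runs h hle _
    have hi : i = mask.length := by omega
    rw [pfrOuter, dif_neg (by omega)]
    simp [hi]
  | succ m ih =>
    intro i runs h hle hinv
    by_cases hlt : i < mask.length
    · by_cases hm : mask.getD i false = true
      · -- run case
        set j := pfrInner mask i with hj
        have hij : i < j := pfrInner_gt mask i ⟨hlt, hm⟩
        have hjn : j ≤ mask.length := pfrInner_le mask mask.length i (by omega) (by omega)
        have hall : ∀ k, i ≤ k → k < j → mask.getD k false = true :=
          pfrInner_all mask mask.length i (by omega)
        have hstop : mask.getD j false = false := pfrInner_stop mask mask.length i (by omega)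
        have hstopN : (mask[j]?).getD false = false := by
          rw [← List.getD_eq_getElem?_getD]; exact hstop
        -- split the index range at j
        have hsplit : List.range' i (mask.length - i)
            = List.range' i (j - i) ++ List.range' j (mask.length - j) := by
          have h0 := @List.range'_append i (j - i) (mask.length - j) 1
          rw [show i + 1 * (j - i) = j by omega,
            show (j - i) + (mask.length - j) = mask.length - i by omega] at h0
          exact h0.symm
        -- starts filter over the run = [i]
        have hstarts : (List.range' i (j - i)).filter (pfrStartP mask) = [i] := by
          obtain ⟨c, hc⟩ : ∃ c, j - i = c + 1 := ⟨j - i - 1, by omega⟩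
          rw [hc, List.range'_succ, List.filter_cons]
          have hmN : (mask[i]?).getD false = true := by
            rw [← List.getD_eq_getElem?_getD]; exact hm
          have hpi : pfrStartP mask i = true := by
            rcases hinv hm with h0 | hprev
            · simp [pfrStartP, h0]
              exact h0 ▸ hmN
            · have hpN : (mask[i - 1]?).getD false = false := by
                rw [← List.getD_eq_getElem?_getD]; exact hprev
              simp [pfrStartP, hmN, hpN]
          rw [if_pos hpi]
          have hnil : (List.range' (i + 1) c).filter (pfrStartP mask) = [] := by
            rw [List.filter_eq_nil_iff]
            intro k hk
            rw [List.mem_range'] at hk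
            obtain ⟨l, hl, hke⟩ := hk
            have hprevN : (mask[k - 1]?).getD false = true := by
              rw [← List.getD_eq_getElem?_getD]
              exact hall (k - 1) (by omega) (by omega)
            simp [pfrStartP, hprevN, show ¬ k = 0 by omega]
          rw [hnil]
        -- ends filter over the run = [j-1]
        have hends : (List.range' i (j - i)).filter (pfrEndP mask) = [j - 1] := by
          have h1 : List.range' i (j - i) = List.range' i (j - 1 - i) ++ [j - 1] := by
            have h0 := @List.range'_append i (j - 1 - i) 1 1
            rw [show i + 1 * (j - 1 - i) = j - 1 by omega,
              show (j - 1 - i) + 1 = j - i by omega, List.range'_one] at h0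
            exact h0.symm
          rw [h1, List.filter_append]
          have hnil : (List.range' i (j - 1 - i)).filter (pfrEndP mask) = [] := by
            rw [List.filter_eq_nil_iff]
            intro k hk
            rw [List.mem_range'] at hk
            obtain ⟨l, hl, hke⟩ := hk
            have hnextN : (mask[k + 1]?).getD false = true := by
              rw [← List.getD_eq_getElem?_getD]
              exact hall (k + 1) (by omega) (by omega)
            simp [pfrEndP, hnextN, show ¬ k = mask.length - 1 by omega]
          have hpj : pfrEndP mask (j - 1) = true := by
            have hmjN : (mask[j - 1]?).getD false = true := by
              rw [← List.getD_eq_getElem?_getD]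
              exact hall (j - 1) (by omega) (by omega)
            simp [pfrEndP, hmjN, show j - 1 + 1 = j by omega, hstopN]
          rw [hnil, List.filter_cons, if_pos hpj]
          rfl
        -- unfold one step of A and apply the induction hypothesis from j
        rw [pfrOuter, dif_pos hlt, dif_pos hm]
        rw [ih j (runs ++ [((i : Int), PySem.List.slice pattern (some (i : Int)) (some (j : Int)))])
          (by omega) hjn
          (fun hc => by rw [hstop] at hc; exact absurd hc (by decide))]
        rw [hsplit, List.filter_append, List.filter_append, hstarts, hends]
        simp [show j - 1 + 1 = j from by omega, List.append_assoc]
      · -- false bit: skip it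
        rw [pfrOuter, dif_pos hlt, dif_neg hm]
        have hm' : mask.getD i false = false := by simpa using hm
        rw [ih (i + 1) runs (by omega) (by omega)
          (fun _ => Or.inr (by simpa using hm'))]
        obtain ⟨c, hc⟩ : ∃ c, mask.length - i = c + 1 := ⟨mask.length - i - 1, by omega⟩
        rw [hc, List.range'_succ, List.filter_cons, List.filter_cons]
        have hmN : (mask[i]?).getD false = false := by
          rw [← List.getD_eq_getElem?_getD]; exact hm'
        have hs : pfrStartP mask i = false := by simp [pfrStartP, hmN]
        have he : pfrEndP mask i = false := by simp [pfrEndP, hmN]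
        rw [if_neg (by simp [hs]), if_neg (by simp [he])]
        rw [show c = mask.length - (i + 1) by omega]
    · have hi : i = mask.length := by omega
      rw [pfrOuter, dif_neg hlt]
      simp [hi]

-- ===== VERDICT (by name: the statement is the Claim_ definition above) =====
theorem precompute_fixed_runs_spec : Claim_equal_precompute_fixed_runs := by
  intro pattern mask _
  unfold Spec_precompute_fixed_runs precompute_fixed_runs precompute_fixed_runs_alt
  have h := pfr_main pattern mask mask.length 0 [] (by omega) (by omega) (fun _ => Or.inl rfl)
  simpa [List.range_eq_range'] using h
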